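-- pv_equiv track=rewrite | github.com/jz4o/codingames | python3/practice/classic_puzzle/medium/what-the-brainfuck.py | get_jump_index_pairs
-- ===== SOURCE A (Python) =====
-- def get_jump_index_pairs(program):
--     jump_index_pairs = {}
--     jump_index_pair_stack = []
--
--     for index, command in enumerate(program):
--         if command == '[':
--             jump_index_pair_stack.append(index)
--         elif command == ']':
--             if len(jump_index_pair_stack) <= 0:
--                 raise Exception('SYNTAX ERROR')
--
--             pair_index = jump_index_pair_stack.pop(-1)
--
--             jump_index_pairs[pair_index] = index
--             jump_index_pairs[index] = pair_index
--
--     if len(jump_index_pair_stack) > 0: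
--         raise Exception('SYNTAX ERROR')
--
--     return jump_index_pairs
-- ===== SOURCE B (Python) =====
-- def get_jump_index_pairs(program):
--     pairs = {}
--     seen = []  # already-processed (index, command) pairs, most recent first
--     for index, command in enumerate(program):
--         if command == ']':
--             depth = 0
--             match_index = -1
--             for back_index, back_command in seen:
--                 if back_command == ']':
--                     depth += 1
--                 elif back_command == '[':
--                     if depth == 0:
--                         match_index = back_index
--                         break
--                     depth -= 1
--             if match_index < 0:
--                 raise Exception('SYNTAX ERROR')
--             pairs[match_index] = index
--             pairs[index] = match_index
--         seen = [(index, command)] + seen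
--     if program.count('[') != program.count(']'):
--         raise Exception('SYNTAX ERROR')
--     return pairs
-- ===== Notes on version B (the rewrite author's own statement) =====
-- stated objective: alternative
-- what changed: B drops A's explicit open-bracket stack and instead, at each ']', finds the matching '[' by scanning the already-seen prefix backwards with a depth counter, checking total bracket counts at the end; this is O(n^2) nested scanning versus A's O(n) single-pass stack.
import Mathlib
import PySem

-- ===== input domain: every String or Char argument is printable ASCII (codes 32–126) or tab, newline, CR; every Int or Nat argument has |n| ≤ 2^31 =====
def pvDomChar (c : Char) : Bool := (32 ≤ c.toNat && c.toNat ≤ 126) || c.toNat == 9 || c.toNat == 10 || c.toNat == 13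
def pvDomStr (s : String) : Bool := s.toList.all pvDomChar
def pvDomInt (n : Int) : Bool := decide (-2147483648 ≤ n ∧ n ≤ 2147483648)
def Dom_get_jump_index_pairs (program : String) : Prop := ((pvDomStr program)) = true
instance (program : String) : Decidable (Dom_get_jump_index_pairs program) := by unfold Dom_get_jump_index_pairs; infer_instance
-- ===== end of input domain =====

-- B replaces A's explicit open-bracket stack by a backward depth-counting scan over the
-- already-seen prefix at each ']' (alternative decomposition, same O(n·m) worst case is O(n^2) vs A's O(n)).

-- ===== PORT A =====
-- the for-loop over enumerate(program): state = (jump_index_pairs, jump_index_pair_stack); none = raise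
def pvALoop : List (Int × Char) → PySem.Dict Int Int → List Int → Option (PySem.Dict Int Int × List Int)
  | [], d, s => some (d, s)
  | (index, command) :: rest, d, s =>
    if command = '[' then
      pvALoop rest d (s ++ [index])
    else if command = ']' then
      if s.length ≤ 0 then none
      else
        match PySem.List.pop? s with
        | none => none
        | some (pair_index, s') =>
          pvALoop rest ((d.insert pair_index index).insert index pair_index) s'
    else pvALoop rest d s

def get_jump_index_pairs (program : String) : List (Int × Int) :=
  match pvALoop (PySem.List.enumerate program.toList) PySem.Dict.empty [] with
  | none => []          -- raise Exception('SYNTAX ERROR'); outside Pre_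
  | some (d, s) => if s.length > 0 then [] else d.items

-- ===== PORT B =====
-- the inner backward scan over `seen` (most recent first): returns match_index (-1 = not found)
def pvBScan : List (Int × Char) → Int → Int
  | [], _ => -1
  | (back_index, back_command) :: rest, depth =>
    if back_command = ']' then pvBScan rest (depth + 1)
    else if back_command = '[' then
      (if depth = 0 then back_index else pvBScan rest (depth - 1))
    else pvBScan rest depth

-- the outer for-loop: state = (pairs, seen); none = raise
def pvBLoop : List (Int × Char) → PySem.Dict Int Int → List (Int × Char) → Option (PySem.Dict Int Int)
  | [], d, _ => some d
  | (index, command) :: rest, d, seen =>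
    if command = ']' then
      let match_index := pvBScan seen 0
      if match_index < 0 then none
      else pvBLoop rest ((d.insert match_index index).insert index match_index) ((index, command) :: seen)
    else pvBLoop rest d ((index, command) :: seen)

def get_jump_index_pairs_alt (program : String) : List (Int × Int) :=
  match pvBLoop (PySem.List.enumerate program.toList) PySem.Dict.empty [] with
  | none => []          -- raise Exception('SYNTAX ERROR'); outside Pre_
  | some d =>
    if PySem.Str.count program "[" ≠ PySem.Str.count program "]" then [] else d.items

-- ===== PRECONDITION & SPEC =====
-- Pre_ excludes exactly the inputs on which A raises Exception('SYNTAX ERROR'):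
-- programs whose brackets are not balanced (a prefix with more ']' than '[', or unequal totals).
def Pre_get_jump_index_pairs (program : String) : Prop :=
  (∀ k < program.toList.length + 1,
      (program.toList.take k).count ']' ≤ (program.toList.take k).count '[') ∧
  program.toList.count '[' = program.toList.count ']'
instance (program : String) : Decidable (Pre_get_jump_index_pairs program) := by
  unfold Pre_get_jump_index_pairs; infer_instance

def pvWitness_get_jump_index_pairs : String := "+[>[-]<]."

def Spec_get_jump_index_pairs (program : String) (out : List (Int × Int)) : Prop := out = get_jump_index_pairs_alt program
instance (program : String) (out : List (Int × Int)) : Decidable (Spec_get_jump_index_pairs program out) := by unfold Spec_get_jump_index_pairs; infer_instance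

-- ===== CLAIM (what is proved, stated in full; the proofs are below) =====
def Claim_equal_get_jump_index_pairs : Prop := ∀ (program : String), Dom_get_jump_index_pairs program → Pre_get_jump_index_pairs program → Spec_get_jump_index_pairs program (get_jump_index_pairs program)

-- ===== LEMMAS AND PROOFS =====

-- the stack A maintains, as a function of the consumed prefix (pop on empty = no-op junk)
def pvStk : List Int → List (Int × Char) → List Int
  | s, [] => s
  | s, (i, c) :: rest =>
    if c = '[' then pvStk (s ++ [i]) rest
    else if c = ']' then pvStk s.dropLast rest
    else pvStk s rest

theorem pvStk_append (a b : List (Int × Char)) (s : List Int) :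
    pvStk s (a ++ b) = pvStk (pvStk s a) b := by
  induction a generalizing s with
  | nil => rfl
  | cons p rest ih =>
    obtain ⟨i, c⟩ := p
    simp only [pvStk, List.cons_append]
    split_ifs <;> exact ih _

-- the backward depth-counting scan reads off the d-th element from the top of A's stack
theorem pvBScan_eq_stack (r : List (Int × Char)) (d : Int) (hd : 0 ≤ d) :
    pvBScan r d = (pvStk [] r.reverse).reverse.getD d.toNat (-1) := by
  induction r generalizing d with
  | nil => simp [pvBScan, pvStk]
  | cons p r' ih =>
    obtain ⟨j, c⟩ := p
    have hstep : pvStk [] (((j, c) :: r').reverse : List (Int × Char))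
        = pvStk (pvStk [] r'.reverse) [(j, c)] := by
      rw [List.reverse_cons, pvStk_append]
    rw [hstep]
    set S := pvStk [] r'.reverse with hS
    by_cases h1 : c = ']'
    · have hcn : ¬ c = '[' := by rw [h1]; decide
      simp only [pvBScan, pvStk, if_pos h1, if_neg hcn]
      rw [ih (d + 1) (by omega)]
      have h5 : (d + 1).toNat = d.toNat + 1 := by omega
      have h4 : S.dropLast.reverse = S.reverse.tail := Eq.symm List.tail_reverse
      rw [h5]
      simp only [List.getD]
      rw [h4, List.getElem?_tail]
    · by_cases h2 : c = '['
      · simp only [pvBScan, pvStk, if_neg h1, if_pos h2]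
        by_cases h3 : d = 0
        · rw [if_pos h3, h3]
          simp [List.getD, List.reverse_append]
        · rw [if_neg h3, ih (d - 1) (by omega)]
          have h5 : d.toNat = (d - 1).toNat + 1 := by omega
          rw [h5]
          simp [List.getD, List.reverse_append]
      · simp only [pvBScan, pvStk, if_neg h1, if_neg h2]
        exact ih d hd

-- A's loop never raises and ends with the predicted stack, under the prefix-balance condition
theorem pvALoop_total (l : List (Int × Char)) (d : PySem.Dict Int Int) (s : List Int)
    (h : ∀ k ≤ l.length, ((l.map Prod.snd).take k).count ']' ≤ ((l.map Prod.snd).take k).count '[' + s.length) :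
    ∃ d', pvALoop l d s = some (d', pvStk s l) ∧
      (pvStk s l).length + (l.map Prod.snd).count ']' = s.length + (l.map Prod.snd).count '[' := by
  induction l generalizing d s with
  | nil => exact ⟨d, rfl, by simp [pvStk]⟩
  | cons p rest ih =>
    obtain ⟨i, c⟩ := p
    by_cases h1 : c = '['
    · have h' : ∀ k ≤ rest.length,
          ((rest.map Prod.snd).take k).count ']' ≤ ((rest.map Prod.snd).take k).count '[' + (s ++ [i]).length := by
        intro k hk
        have := h (k + 1) (by simp; omega)
        simp only [List.map_cons, List.take_succ_cons, List.count_cons, h1] at this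
        simp only [List.length_append, List.length_cons, List.length_nil]
        revert this
        split_ifs <;> simp_all <;> omega
      obtain ⟨d', hrun, hcnt⟩ := ih d (s ++ [i]) h'
      refine ⟨d', ?_, ?_⟩
      · simp only [pvALoop, pvStk, if_pos h1]
        exact hrun
      · simp only [pvStk, List.map_cons, List.count_cons, h1] at *
        revert hcnt
        split_ifs <;> simp_all <;> omega
    · by_cases h2 : c = ']'
      · have hpos : 0 < s.length := by
          have := h 1 (by simp)
          simp [h2] at this
          omega
        rcases s.eq_nil_or_concat with rfl | ⟨s0, x, rfl⟩
        · simp at hpos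
        · simp only [List.concat_eq_append] at h hpos ⊢
          have h' : ∀ k ≤ rest.length,
              ((rest.map Prod.snd).take k).count ']' ≤ ((rest.map Prod.snd).take k).count '[' + s0.length := by
            intro k hk
            have := h (k + 1) (by simp; omega)
            simp only [List.map_cons, List.take_succ_cons, List.count_cons, h2] at this
            revert this
            split_ifs <;> simp_all <;> omega
          obtain ⟨d', hrun, hcnt⟩ :=
            ih ((d.insert x i).insert i x) s0 h'
          have hdl : (s0 ++ [x]).dropLast = s0 := by simp
          refine ⟨d', ?_, ?_⟩
          · simp only [pvALoop, pvStk, if_neg h1, if_pos h2]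
            rw [if_neg (by simp), PySem.List.pop?_last, hdl]
            exact hrun
          · simp only [pvStk]
            rw [if_neg h1, if_pos h2, hdl]
            simp [h2]
            omega
      · have h' : ∀ k ≤ rest.length,
            ((rest.map Prod.snd).take k).count ']' ≤ ((rest.map Prod.snd).take k).count '[' + s.length := by
          intro k hk
          have := h (k + 1) (by simp; omega)
          simp only [List.map_cons, List.take_succ_cons, List.count_cons] at this
          revert this
          split_ifs <;> simp_all
        obtain ⟨d', hrun, hcnt⟩ := ih d s h'
        refine ⟨d', ?_, ?_⟩
        · simp only [pvALoop, pvStk, if_neg h1, if_neg h2]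
          exact hrun
        · simp only [pvStk]
          rw [if_neg h1, if_neg h2]
          simpa [List.count_cons, h1, h2] using hcnt

-- B's loop equals (the dict part of) A's loop, given the seen/stack correspondence
theorem pvBLoop_eq (l : List (Int × Char)) (d : PySem.Dict Int Int)
    (seen : List (Int × Char)) (s : List Int)
    (hrel : s = pvStk [] seen.reverse)
    (hs : ∀ x ∈ s, 0 ≤ x)
    (hl : ∀ p ∈ l, 0 ≤ Prod.fst p) :
    pvBLoop l d seen = (pvALoop l d s).map Prod.fst := by
  induction l generalizing d seen s with
  | nil => simp [pvBLoop, pvALoop]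
  | cons p rest ih =>
    obtain ⟨i, c⟩ := p
    have hi : 0 ≤ i := hl (i, c) List.mem_cons_self
    have hrest : ∀ p ∈ rest, 0 ≤ Prod.fst p := fun p hp => hl p (List.mem_cons_of_mem _ hp)
    have hseen : pvStk [] (((i, c) :: seen)).reverse = pvStk s [(i, c)] := by
      rw [List.reverse_cons, pvStk_append, ← hrel]
    by_cases h1 : c = ']'
    · have hcn : ¬ c = '[' := by rw [h1]; decide
      have hscan : pvBScan seen 0 = s.reverse.getD 0 (-1) := by
        have := pvBScan_eq_stack seen 0 le_rfl
        rw [← hrel] at this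
        simpa using this
      rcases s.eq_nil_or_concat with rfl | ⟨s0, x, rfl⟩
      · simp only [pvBLoop, pvALoop, if_pos h1, if_neg hcn, hscan]
        norm_num
      · simp only [List.concat_eq_append] at hrel hs hseen hscan ⊢
        have hx : 0 ≤ x := hs x (by simp)
        have hscan' : pvBScan seen 0 = x := by
          rw [hscan]; simp [List.reverse_append, List.getD]
        simp only [pvBLoop, pvALoop, if_pos h1, if_neg hcn, hscan']
        rw [if_neg (by omega), if_neg (by simp), PySem.List.pop?_last]
        simp only [Option.map]
        exact ih ((d.insert x i).insert i x) ((i, c) :: seen) s0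
          (by rw [hseen]; simp [pvStk, h1])
          (fun y hy => hs y (by simp [hy]))
          hrest
    · by_cases h2 : c = '['
      · simp only [pvBLoop, pvALoop, if_neg h1, if_pos h2]
        exact ih d ((i, c) :: seen) (s ++ [i])
          (by rw [hseen]; simp [pvStk, h2])
          (by intro y hy; rcases List.mem_append.1 hy with hy | hy
              · exact hs y hy
              · simp_all)
          hrest
      · simp only [pvBLoop, pvALoop, if_neg h1, if_neg h2]
        exact ih d ((i, c) :: seen) s
          (by rw [hseen]; simp [pvStk, if_neg h2, if_neg h1])
          hs hrest

-- single-character Python str.count is List.count (helper for B's final counts check)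
theorem pvCountGo_singleton (c : Char) (fuel : Nat) (l : List Char) (acc : Nat)
    (h : l.length ≤ fuel) :
    PySem.Chars.count.go [c] fuel l acc = acc + l.count c := by
  induction fuel generalizing l acc with
  | zero =>
    have hnil : l = [] := by cases l <;> simp_all
    simp [hnil, PySem.Chars.count.go]
  | succ f ih =>
    cases l with
    | nil => simp [PySem.Chars.count.go]
    | cons x t =>
      rw [PySem.Chars.count.go]
      by_cases hx : c = x
      · subst hx
        rw [if_pos (by simp)]
        simp only [List.length_singleton, List.drop_succ_cons, List.drop_zero]
        rw [ih t (acc + 1) (by simp_all)]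
        simp
        omega
      · rw [if_neg (by simp [List.isPrefixOf, hx])]
        rw [ih t acc (by simp_all)]
        simp [Ne.symm hx]

theorem pvCount_singleton (cs : List Char) (c : Char) :
    PySem.Chars.count cs [c] = cs.count c := by
  rw [PySem.Chars.count, if_neg (by simp)]
  simpa using pvCountGo_singleton c cs.length cs 0 le_rfl

-- ===== VERDICT (by name: the statement is the Claim_ definition above) =====
theorem get_jump_index_pairs_spec : Claim_equal_get_jump_index_pairs := by
  intro program _hdom hpre
  obtain ⟨hpref, htot⟩ := hpre
  unfold Spec_get_jump_index_pairs get_jump_index_pairs get_jump_index_pairs_alt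
  set l := PySem.List.enumerate program.toList with hl
  have hmap : l.map Prod.snd = program.toList := PySem.List.map_snd_enumerate program.toList 0
  have hlen : l.length = program.toList.length := PySem.List.length_enumerate program.toList 0
  obtain ⟨d', hrun, hcnt⟩ := pvALoop_total l PySem.Dict.empty []
    (by intro k hk
        rw [hmap]
        simpa using hpref k (by omega))
  have hstk_nil : pvStk [] l = [] := by
    apply List.eq_nil_of_length_eq_zero
    rw [hmap] at hcnt
    simp only [List.length_nil] at hcnt
    omega
  have hB : pvBLoop l PySem.Dict.empty [] = some d' := by
    rw [pvBLoop_eq l PySem.Dict.empty [] [] rfl (by simp)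
      (by intro p hp
          rw [PySem.List.mem_enumerate_iff] at hp
          obtain ⟨k, hk, rfl⟩ := hp
          simp), hrun]
    rfl
  rw [hrun, hB, hstk_nil]
  have hc : PySem.Chars.count program.toList ['['] = PySem.Chars.count program.toList [']'] := by
    rw [pvCount_singleton, pvCount_singleton, htot]
  simp [hc]
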